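-- pv_equiv track=rewrite | github.com/clairelin135/procare | backend/ml/state_prediction/model_creator/.ipynb_checkpoints/main-checkpoint.py | chat_words_processing
-- ===== SOURCE A (Python) =====
-- def chat_words_processing(words, disease):
--     buzz_words = {
--         "depression":["tired", "overlooked", "depressed", "bogged down", "disheartened", "stressed", "bipolar", "drained", "fatigued"],
--         "sad": ["tired", "sad", "fatigued"],
--         "lumbago": ["sore", "uncomfortable", "in pain", "stiff", "irritated"],
--     }
--
--     words = words.split(",")
--
--     score = 0
--     compare_list = buzz_words[disease]
--
--     for word in words:
--         if word in compare_list: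
--             score += 1
--
--     return score
-- ===== SOURCE B (Python) =====
-- def chat_words_processing(words, disease):
--     buzz_words = {
--         "depression": ["tired", "overlooked", "depressed", "bogged down", "disheartened", "stressed", "bipolar", "drained", "fatigued"],
--         "sad": ["tired", "sad", "fatigued"],
--         "lumbago": ["sore", "uncomfortable", "in pain", "stiff", "irritated"],
--     }
--     compare_list = buzz_words[disease]
--     counts = {}
--     for w in words.split(","):
--         counts[w] = counts.get(w, 0) + 1
--     return sum(counts.get(w, 0) for w in compare_list)
-- ===== Notes on version B (the rewrite author's own statement) =====
-- stated objective: alternative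
-- what changed: Instead of scanning each comma-split word and testing list membership against the buzzword list, B builds a frequency table of the split words once and then sums the counts of the (duplicate-free) buzzwords, inverting the traversal.
import Mathlib
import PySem

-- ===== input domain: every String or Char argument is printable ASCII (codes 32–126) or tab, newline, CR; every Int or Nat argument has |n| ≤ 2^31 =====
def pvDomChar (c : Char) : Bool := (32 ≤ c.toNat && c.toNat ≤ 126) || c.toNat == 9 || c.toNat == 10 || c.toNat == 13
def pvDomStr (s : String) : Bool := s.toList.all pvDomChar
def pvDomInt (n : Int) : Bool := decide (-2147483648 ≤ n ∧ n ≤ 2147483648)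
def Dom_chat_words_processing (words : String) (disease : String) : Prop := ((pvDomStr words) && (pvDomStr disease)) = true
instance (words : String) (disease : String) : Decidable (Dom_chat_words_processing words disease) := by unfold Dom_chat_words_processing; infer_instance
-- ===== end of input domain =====

-- B builds a frequency table of the comma-split words once and sums the counts of the buzzwords,
-- inverting A's traversal (A scans each word and tests membership in the buzzword list).

-- ===== PORT A =====
def buzzWordsA : PySem.Dict String (List String) :=
  PySem.Dict.ofList [("depression", ["tired", "overlooked", "depressed", "bogged down", "disheartened", "stressed", "bipolar", "drained", "fatigued"]),
   ("sad", ["tired", "sad", "fatigued"]),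
   ("lumbago", ["sore", "uncomfortable", "in pain", "stiff", "irritated"])]

def chat_words_processing (words : String) (disease : String) : Int :=
  let ws := (PySem.Str.split? words ",").getD []
  let compare_list := (PySem.Dict.get? buzzWordsA disease).getD []   -- buzz_words[disease]; KeyError excluded by Pre_
  ws.foldl (fun score word => if compare_list.contains word then score + 1 else score) 0

-- ===== PORT B =====
-- (B declares the same buzz_words literal; both ports share the constant buzzWordsA)
def chat_words_processing_alt (words : String) (disease : String) : Int :=
  let compare_list := (PySem.Dict.get? buzzWordsA disease).getD []   -- buzz_words[disease]; KeyError excluded by Pre_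
  let counts : PySem.Dict String Int :=
    ((PySem.Str.split? words ",").getD []).foldl (fun d w => d.insert w (d.getD w 0 + 1)) PySem.Dict.empty
  compare_list.foldl (fun s w => s + counts.getD w 0) 0

-- ===== PRECONDITION & SPEC =====
-- Pre_ excludes diseases that are not keys of buzz_words, on which A raises KeyError.
def Pre_chat_words_processing (words : String) (disease : String) : Prop :=
  disease = "depression" ∨ disease = "sad" ∨ disease = "lumbago"
instance (words : String) (disease : String) : Decidable (Pre_chat_words_processing words disease) := by
  unfold Pre_chat_words_processing; infer_instance

def pvWitness_chat_words_processing : String × String := ("tired,sad,tired", "sad")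

def Spec_chat_words_processing (words : String) (disease : String) (out : Int) : Prop := out = chat_words_processing_alt words disease
instance (words : String) (disease : String) (out : Int) : Decidable (Spec_chat_words_processing words disease out) := by unfold Spec_chat_words_processing; infer_instance

-- ===== CLAIM (what is proved, stated in full; the proofs are below) =====
def Claim_equal_chat_words_processing : Prop := ∀ (words : String) (disease : String), Dom_chat_words_processing words disease → Pre_chat_words_processing words disease → Spec_chat_words_processing words disease (chat_words_processing words disease)

-- ===== LEMMAS AND PROOFS =====

-- membership-count of ws against a duplicate-free list L equals the sum over L of ws's counts
theorem countP_mem_eq_sum_count (ws L : List String) (h : L.Nodup) :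
    ((ws.countP (fun w => L.contains w) : Nat) : Int)
      = (L.map (fun w => ((ws.count w : Nat) : Int))).sum := by
  induction ws with
  | nil => simp
  | cons w ws ih =>
    rw [List.countP_cons, List.map_congr_left (fun x _ => by
        show ((List.count x (w :: ws) : Nat) : Int)
            = ((ws.count x : Nat) : Int) + (if x == w then 1 else 0)
        rw [List.count_cons]; push_cast
        by_cases hxw : x = w
        · subst hxw; simp
        · simp [hxw, (Ne.symm hxw : ¬w = x)])]
    rw [PySem.List.sum_map_add_int, ← ih]
    have hsum : (L.map (fun x => if x == w then (1:Int) else 0)).sum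
        = (if L.contains w then 1 else 0) := by
      rw [PySem.List.sum_map_ite_one_zero]
      have hcp : L.countP (fun x => x == w) = L.count w := rfl
      rw [hcp]
      by_cases hw : w ∈ L
      · rw [List.count_eq_one_of_mem h hw]; simp [hw]
      · rw [List.count_eq_zero_of_not_mem hw]; simp [hw]
    rw [hsum]
    push_cast
    split <;> omega

-- ===== VERDICT (by name: the statement is the Claim_ definition above) =====
theorem chat_words_processing_spec : Claim_equal_chat_words_processing := by
  intro words disease _ hpre
  show chat_words_processing words disease = chat_words_processing_alt words disease
  unfold chat_words_processing chat_words_processing_alt buzzWordsA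
  rcases hpre with h | h | h <;> subst h <;>
    simp only [PySem.List.foldl_if_add_one, PySem.List.foldl_add,
      PySem.Dict.getD_foldl_insert_add_one, PySem.Dict.getD_empty] <;>
    rw [countP_mem_eq_sum_count _ _ (by decide)] <;>
    simp
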